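-- pv_equiv track=rewrite | github.com/aunnam/dsp | python/advanced_python_regex.py | degreeDict
-- ===== SOURCE A (Python) =====
-- def degreeDict(data):
--     dictDegrees = {}
--     for row in data[1:]:
--         degree = row[1].split(' ')
--         for x in range(len(degree)):
--             if degree[x] != '':
--                 if degree[x] in dictDegrees:
--                     dictDegrees[degree[x]] += 1
--                 else:
--                     dictDegrees[degree[x]] = 1
--     return dictDegrees
-- ===== SOURCE B (Python) =====
-- def degreeDict(data):
--     # Alternative decomposition: flatten all non-empty tokens once, order-preserving
--     # dedup, then count each distinct word over the flat list (no dict accumulation).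
--     tokens = [w for row in data[1:] for w in row[1].split(' ') if w != '']
--     seen = []
--     for w in tokens:
--         if w not in seen:
--             seen.append(w)
--     return {w: tokens.count(w) for w in seen}
-- ===== Notes on version B (the rewrite author's own statement) =====
-- stated objective: alternative
-- what changed: Instead of walking rows and incrementing a dict entry per token, B flattens all non-empty tokens into one list, dedups it in first-occurrence order, and builds the result by counting each distinct word over the flat list.
import Mathlib
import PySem

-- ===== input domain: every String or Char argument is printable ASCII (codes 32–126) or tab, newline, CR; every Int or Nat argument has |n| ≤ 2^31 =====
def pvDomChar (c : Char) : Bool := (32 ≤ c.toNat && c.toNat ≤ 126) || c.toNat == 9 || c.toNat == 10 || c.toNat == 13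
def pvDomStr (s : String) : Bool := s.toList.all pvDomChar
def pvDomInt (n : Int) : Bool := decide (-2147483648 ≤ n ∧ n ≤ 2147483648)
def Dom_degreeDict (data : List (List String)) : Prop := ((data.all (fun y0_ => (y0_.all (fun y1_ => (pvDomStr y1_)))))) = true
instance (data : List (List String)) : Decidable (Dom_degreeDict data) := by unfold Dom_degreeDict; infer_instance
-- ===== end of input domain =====

-- B replaces A's row-by-row dict-increment loop with flatten + ordered dedup + per-word count
-- (alternative decomposition, same return value; not claimed faster).

-- ===== PORT A =====
-- row[1].split(' '): sep is the nonempty literal " ", so Str.split? is always `some`; getD [] is never taken.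
def degreeDict (data : List (List String)) : List (String × Int) :=
  (((PySem.List.slice data (some 1) none).foldl (fun d row =>
      let degree := (PySem.Str.split? (PySem.List.pyGetD row 1 "") " ").getD []
      (PySem.List.pyRange 0 (degree.length : Int) 1).foldl (fun d x =>
        let w := PySem.List.pyGetD degree x ""
        if w ≠ "" then
          if d.contains w then d.modify w 0 (· + 1) else d.insert w (1 : Int)
        else d) d)
    (PySem.Dict.empty : PySem.Dict String Int))).items

-- ===== PORT B =====
def degreeDict_alt (data : List (List String)) : List (String × Int) :=
  let tokens := (PySem.List.slice data (some 1) none).flatMap (fun row =>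
    ((PySem.Str.split? (PySem.List.pyGetD row 1 "") " ").getD []).filter (fun w => w ≠ ""))
  let seen := tokens.foldl (fun s w => if s.contains w then s else s ++ [w]) []
  seen.map (fun w => (w, (PySem.List.count tokens w : Int)))

-- ===== PRECONDITION & SPEC =====
-- Pre_ excludes exactly the inputs where Python A raises IndexError: a row after the header with fewer than 2 columns.
def Pre_degreeDict (data : List (List String)) : Prop :=
  ∀ row ∈ data.tail, 2 ≤ row.length
instance (data : List (List String)) : Decidable (Pre_degreeDict data) := by unfold Pre_degreeDict; infer_instance
def pvWitness_degreeDict : List (List String) := [["name", "degree"], ["x", "BS MS"], ["y", " BS  PhD"]]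
def Spec_degreeDict (data : List (List String)) (out : List (String × Int)) : Prop := out = degreeDict_alt data
instance (data : List (List String)) (out : List (String × Int)) : Decidable (Spec_degreeDict data out) := by unfold Spec_degreeDict; infer_instance

-- ===== CLAIM (what is proved, stated in full; the proofs are below) =====
def Claim_equal_degreeDict : Prop := ∀ (data : List (List String)), Dom_degreeDict data → Pre_degreeDict data → Spec_degreeDict data (degreeDict data)

-- ===== LEMMAS AND PROOFS =====

-- A's "in dict then += else = 1" step is exactly Counter's modify step.
theorem pv_step_eq_modify (d : PySem.Dict String Int) (w : String) :
    (if d.contains w then d.modify w 0 (· + 1) else d.insert w (1 : Int)) = d.modify w 0 (· + 1) := by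
  by_cases h : d.contains w = true
  · simp [h]
  · simp only [h, if_false, Bool.false_eq_true, PySem.Dict.modify,
      PySem.Dict.getD_of_not_contains d 0 (by simpa using h)]
    norm_num

-- rows.foldl of an inner foldl = foldl over the flattened list
theorem pv_foldl_foldl_flatMap {α β γ : Type} (g : α → List β) (f : γ → β → γ) (l : List α) (init : γ) :
    l.foldl (fun acc x => (g x).foldl f acc) init = (l.flatMap g).foldl f init := by
  induction l generalizing init with
  | nil => rfl
  | cons a l ih => simp [List.flatMap_cons, List.foldl_append, ih]

-- ===== VERDICT (by name: the statement is the Claim_ definition above) =====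
theorem degreeDict_spec : Claim_equal_degreeDict := by
  intro data _ _
  unfold Spec_degreeDict degreeDict degreeDict_alt
  have hbody : (fun (d : PySem.Dict String Int) (row : List String) =>
      let degree := (PySem.Str.split? (PySem.List.pyGetD row 1 "") " ").getD []
      (PySem.List.pyRange 0 (degree.length : Int) 1).foldl (fun d x =>
        let w := PySem.List.pyGetD degree x ""
        if w ≠ "" then
          if d.contains w then d.modify w 0 (· + 1) else d.insert w (1 : Int)
        else d) d)
      = (fun d row =>
      ((((PySem.Str.split? (PySem.List.pyGetD row 1 "") " ").getD []).filter
          (fun w => w ≠ "")).foldl (fun d w => d.modify w 0 (· + 1)) d)) := by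
    funext d row
    dsimp only
    rw [PySem.List.foldl_pyRange_zero_pyGetD'
      ((PySem.Str.split? (PySem.List.pyGetD row 1 "") " ").getD []) ""
      (fun d w => if w ≠ "" then
          if d.contains w then d.modify w 0 (· + 1) else d.insert w (1 : Int)
        else d) d]
    rw [List.foldl_filter]
    exact PySem.List.foldl_congr_mem _ _ _ d (fun d w _ => by
      by_cases h : w = "" <;> simp [h, pv_step_eq_modify])
  rw [hbody, pv_foldl_foldl_flatMap, ← PySem.Dict.counter_eq_foldl,
    PySem.Dict.items_counter]
  simp only [PySem.List.count_eq]
  rfl
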